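-- pv_equiv track=rewrite | github.com/king-p3nguin/qhack2024-amplitude-embedding | cancel_cnots.py | _matrix_M_entry
-- ===== SOURCE A (Python) =====
-- def _matrix_M_entry(row, col):
--     # (col >> 1) ^ col is the Gray code of col
--     b_and_g = row & ((col >> 1) ^ col)
--     sum_of_ones = 0
--     while b_and_g > 0:
--         if b_and_g & 0b1:
--             sum_of_ones += 1
--
--         b_and_g = b_and_g >> 1
--
--     return (-1) ** sum_of_ones
-- ===== SOURCE B (Python) =====
-- def _matrix_M_entry(row, col):
--     b = row & ((col >> 1) ^ col)
--     if b <= 0: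
--         return 1
--     shift = 1
--     while (b >> shift) > 0:
--         b ^= b >> shift
--         shift <<= 1
--     return -1 if b & 1 else 1
-- ===== Notes on version B (the rewrite author's own statement) =====
-- stated objective: alternative
-- what changed: Replaces A's bit-by-bit loop that counts every set bit of row & gray(col) with a logarithmic XOR-reduction that folds the mask onto itself with doubling shifts until bit 0 holds the parity, then maps that single bit to +/-1.
import Mathlib
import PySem

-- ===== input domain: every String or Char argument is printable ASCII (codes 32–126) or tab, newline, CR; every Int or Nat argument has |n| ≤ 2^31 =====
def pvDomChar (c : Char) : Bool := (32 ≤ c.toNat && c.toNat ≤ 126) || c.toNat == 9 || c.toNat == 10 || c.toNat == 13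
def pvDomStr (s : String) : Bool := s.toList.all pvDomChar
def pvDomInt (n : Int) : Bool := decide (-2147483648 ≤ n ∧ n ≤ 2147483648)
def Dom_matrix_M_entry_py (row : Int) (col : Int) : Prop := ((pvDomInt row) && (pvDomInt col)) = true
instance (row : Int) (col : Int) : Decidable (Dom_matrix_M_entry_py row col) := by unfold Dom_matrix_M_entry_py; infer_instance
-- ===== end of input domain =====

-- B replaces A's bit-by-bit popcount loop with a logarithmic XOR-reduction of the same
-- mask (objective: alternative; no speed is claimed).

-- ===== PORT A =====
-- A's while loop: counts the set bits of b one bit at a time (b > 0 guard, b >>= 1).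
def aLoopSum (b : Int) (acc : Int) : Int :=
  if h : 0 < b then
    aLoopSum (b >>> (1:Nat)) (acc + if PySem.Int.band b 1 ≠ 0 then 1 else 0)
  else acc
termination_by b.toNat
decreasing_by
  cases b with
  | ofNat n =>
      show ((Int.ofNat (n >>> 1)).toNat) < (Int.ofNat n).toNat
      have hn : 0 < n := Nat.pos_of_ne_zero (by rintro rfl; simp at h)
      simpa [Nat.shiftRight_one] using Nat.div_lt_self hn (by norm_num)
  | negSucc n => exact absurd h (by simp)

def matrix_M_entry_py (row : Int) (col : Int) : Int :=
  -- b_and_g = row & ((col >> 1) ^ col)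
  let b_and_g := PySem.Int.band row (PySem.Int.bxor (col >>> (1:Nat)) col)
  let sum_of_ones := aLoopSum b_and_g 0
  -- (-1) ** sum_of_ones  (sum_of_ones ≥ 0, so the Nat exponent is exact)
  (-1 : Int) ^ sum_of_ones.toNat

-- ===== PORT B =====
-- termination lemma for bFold's loop: the not-yet-folded part strictly shrinks
theorem pv_key_dec (n s : Nat) (hs : 1 ≤ s) (hpos : 0 < n >>> s) :
    (n ^^^ (n >>> s)) >>> (s <<< 1) < n >>> s := by
  have h2s : s <<< 1 = 2 * s := by omega
  rw [h2s]
  set m := n.size with hm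
  have hn0 : n ≠ 0 := by
    intro h; rw [h] at hpos; simp [Nat.shiftRight_eq_div_pow] at hpos
  have hnlt : n < 2 ^ m := Nat.lt_size_self n
  have hshlt : n >>> s ≤ n := by
    rw [Nat.shiftRight_eq_div_pow]; exact Nat.div_le_self _ _
  have hxlt : (n ^^^ (n >>> s)) < 2 ^ m :=
    Nat.xor_lt_two_pow hnlt (lt_of_le_of_lt hshlt hnlt)
  -- upper bound on the new value
  have hub : (n ^^^ (n >>> s)) >>> (2 * s) < 2 ^ (m - 2 * s) := by
    rw [Nat.shiftRight_eq_div_pow]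
    have hpow : 2 ^ m ≤ 2 ^ (2 * s) * 2 ^ (m - 2 * s) := by
      rw [← pow_add]
      exact Nat.pow_le_pow_right (by norm_num) (by omega)
    exact Nat.div_lt_of_lt_mul (lt_of_lt_of_le hxlt hpow)
  -- lower bound on the old value
  have hlb : 2 ^ (m - 1 - s) ≤ n >>> s := by
    by_cases hcase : s ≤ m - 1
    · have hsz : 2 ^ (m - 1) ≤ n := by
        have hmpos : 0 < m := Nat.size_pos.mpr (Nat.pos_of_ne_zero hn0)
        exact Nat.lt_size.mp (by omega)
      rw [Nat.shiftRight_eq_div_pow]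
      rw [Nat.le_div_iff_mul_le (Nat.two_pow_pos s)]
      calc 2 ^ (m - 1 - s) * 2 ^ s = 2 ^ (m - 1 - s + s) := (pow_add 2 _ _).symm
        _ ≤ 2 ^ (m - 1) := Nat.pow_le_pow_right (by norm_num) (by omega)
        _ ≤ n := hsz
    · have : m - 1 - s = 0 := by omega
      rw [this]; simpa using hpos
  have hmono : 2 ^ (m - 2 * s) ≤ 2 ^ (m - 1 - s) :=
    Nat.pow_le_pow_right (by norm_num) (by omega)
  omega

-- Source B's while loop; b > 0 on entry, so it runs on b.toNat (Nat's ^^^ / >>> coincide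
-- with Python's on nonnegative ints).  The '1 ≤ shift' conjunct only makes the
-- recursion total (the loop is entered with shift = 1 and shift only doubles).
def bFold (b : Nat) (shift : Nat) : Nat :=
  if h : 1 ≤ shift ∧ 0 < b >>> shift then
    bFold (b ^^^ (b >>> shift)) (shift <<< 1)
  else b
termination_by b >>> shift
decreasing_by
  exact pv_key_dec b shift h.1 h.2

def matrix_M_entry_py_alt (row : Int) (col : Int) : Int :=
  let b := PySem.Int.band row (PySem.Int.bxor (col >>> (1:Nat)) col)
  if b ≤ 0 then 1
  else if (bFold b.toNat 1) &&& 1 ≠ 0 then -1 else 1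

-- ===== PRECONDITION & SPEC =====
def Spec_matrix_M_entry_py (row : Int) (col : Int) (out : Int) : Prop := out = matrix_M_entry_py_alt row col
instance (row : Int) (col : Int) (out : Int) : Decidable (Spec_matrix_M_entry_py row col out) := by unfold Spec_matrix_M_entry_py; infer_instance

-- ===== CLAIM (what is proved, stated in full; the proofs are below) =====
def Claim_equal_matrix_M_entry_py : Prop := ∀ (row : Int) (col : Int), Dom_matrix_M_entry_py row col → Spec_matrix_M_entry_py row col (matrix_M_entry_py row col)

-- ===== LEMMAS AND PROOFS =====

-- XOR of the bits of n at positions 0, s, 2s, … (the "stride-s" bit parity)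
def xorStr (n : Nat) (s : Nat) : Bool :=
  if h : 1 ≤ s ∧ n ≠ 0 then (n.testBit 0).xor (xorStr (n >>> s) s) else false
termination_by n
decreasing_by
  rw [Nat.shiftRight_eq_div_pow]
  exact Nat.div_lt_self (Nat.pos_of_ne_zero h.2) (Nat.one_lt_two_pow_iff.mpr (by omega))

theorem xorStr_zero (s : Nat) : xorStr 0 s = false := by
  rw [xorStr]; simp

theorem xorStr_of_pos {n s : Nat} (hs : 1 ≤ s) (hn : n ≠ 0) :
    xorStr n s = (n.testBit 0).xor (xorStr (n >>> s) s) := by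
  rw [xorStr]; simp [hs, hn]

theorem xorStr_exit {n s : Nat} (hs : 1 ≤ s) (h : n >>> s = 0) :
    xorStr n s = n.testBit 0 := by
  by_cases hn : n = 0
  · subst hn; simp [xorStr_zero]
  · rw [xorStr_of_pos hs hn, h, xorStr_zero, Bool.xor_false]

theorem pv_xor4 (a b c d : Bool) : ((a.xor b).xor (c.xor d)) = ((a.xor c).xor (b.xor d)) := by
  cases a <;> cases b <;> cases c <;> cases d <;> decide

-- xorStr is linear in the bits: it distributes over ^^^
theorem xorStr_xor {s : Nat} (hs : 1 ≤ s) : ∀ a b : Nat, xorStr (a ^^^ b) s = (xorStr a s).xor (xorStr b s) := by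
  intro a
  induction a using Nat.strong_induction_on with
  | _ a ih =>
    intro b
    by_cases ha : a = 0
    · subst ha; simp [xorStr_zero]
    by_cases hb : b = 0
    · subst hb; simp [xorStr_zero]
    by_cases hab : a ^^^ b = 0
    · have hab' : a = b := by
        have := Nat.xor_eq_zero_iff.mp hab; omega
      subst hab'
      rw [hab, xorStr_zero, Bool.xor_self]
    · rw [xorStr_of_pos hs hab, xorStr_of_pos hs ha, xorStr_of_pos hs hb,
        Nat.shiftRight_xor_distrib, Nat.testBit_xor]
      have hlt : a >>> s < a := by
        rw [Nat.shiftRight_eq_div_pow]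
        exact Nat.div_lt_self (Nat.pos_of_ne_zero ha) (Nat.one_lt_two_pow_iff.mpr (by omega))
      rw [ih (a >>> s) hlt (b >>> s)]
      exact pv_xor4 _ _ _ _

-- halving the stride interleaves two double-stride parities
theorem xorStr_interleave {s : Nat} (hs : 1 ≤ s) : ∀ n : Nat,
    xorStr n s = (xorStr n (2 * s)).xor (xorStr (n >>> s) (2 * s)) := by
  intro n
  induction n using Nat.strong_induction_on with
  | _ n ih =>
    by_cases hn : n = 0
    · subst hn; simp [xorStr_zero]
    · have hlt : n >>> s < n := by
        rw [Nat.shiftRight_eq_div_pow]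
        exact Nat.div_lt_self (Nat.pos_of_ne_zero hn) (Nat.one_lt_two_pow_iff.mpr (by omega))
      have hss : n >>> s >>> s = n >>> (2 * s) := by
        rw [← Nat.shiftRight_add]; ring_nf
      rw [xorStr_of_pos hs hn, ih (n >>> s) hlt,
        xorStr_of_pos (s := 2 * s) (by omega) hn, hss]
      cases hx : n.testBit 0 <;>
        simp [Bool.xor_comm]

-- correctness of B's folding loop: bit 0 of the result is the stride-s parity
theorem bFold_bit : ∀ (b s : Nat), 1 ≤ s → (bFold b s).testBit 0 = xorStr b s := by
  intro b s
  induction b, s using bFold.induct with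
  | case1 b s h ih =>
    intro _
    rw [bFold, dif_pos h]
    have h2s : s <<< 1 = 2 * s := by omega
    rw [ih (by omega)]
    rw [h2s]
    rw [xorStr_xor (s := 2 * s) (by omega) b (b >>> s)]
    exact (xorStr_interleave h.1 b).symm
  | case2 b s h =>
    intro hs
    rw [bFold, dif_neg h]
    have hz : b >>> s = 0 := by
      by_contra hnz
      exact h ⟨hs, Nat.pos_of_ne_zero hnz⟩
    exact (xorStr_exit hs hz).symm

-- A's loop as sum of binary digits
def popSum (n : Nat) : Nat :=
  if n = 0 then 0 else (n % 2) + popSum (n / 2)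
decreasing_by exact Nat.div_lt_self (Nat.pos_of_ne_zero (by assumption)) (by norm_num)

theorem toNat_sr1 (b : Int) : (b >>> (1:Nat)).toNat = b.toNat / 2 := by
  cases b with
  | ofNat n =>
      show (Int.ofNat (n >>> 1)).toNat = (Int.ofNat n).toNat / 2
      rfl
  | negSucc n => simp

theorem aLoopSum_eq : ∀ (b acc : Int), aLoopSum b acc = acc + (popSum b.toNat : Int) := by
  intro b
  induction b using (measure Int.toNat).wf.induction with
  | _ b ih =>
    intro acc
    by_cases hb : 0 < b
    · rw [aLoopSum, dif_pos hb]
      have hlt : (b >>> (1:Nat)).toNat < b.toNat := by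
        rw [toNat_sr1]
        exact Nat.div_lt_self (by omega) (by norm_num)
      rw [ih _ hlt]
      have hband : PySem.Int.band b 1 = ((b.toNat &&& 1 : Nat) : Int) := by
        simpa using PySem.Int.band_of_nonneg (a := b) (b := 1) (le_of_lt hb) (by norm_num)
      have hmod : b.toNat &&& 1 = b.toNat % 2 := Nat.and_one_is_mod _
      rw [toNat_sr1, hband, hmod]
      conv_rhs => rw [popSum]
      rw [if_neg (show ¬ b.toNat = 0 by omega)]
      rcases Nat.mod_two_eq_zero_or_one b.toNat with h2 | h2 <;>
        rw [h2] <;> push_cast <;> ring_nf <;> simp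
    · rw [aLoopSum, dif_neg hb]
      have : b.toNat = 0 := by omega
      rw [this, popSum]; simp

-- the stride-1 parity is the parity of the digit sum
theorem xorStr_one : ∀ n : Nat, xorStr n 1 = decide (popSum n % 2 = 1) := by
  intro n
  induction n using Nat.strong_induction_on with
  | _ n ih =>
    by_cases hn : n = 0
    · subst hn; rw [xorStr_zero, popSum]; simp
    · have hlt : n / 2 < n := Nat.div_lt_self (Nat.pos_of_ne_zero hn) (by norm_num)
      rw [xorStr_of_pos (by norm_num) hn, Nat.shiftRight_one, ih _ hlt,
        Nat.testBit_zero]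
      conv_rhs => rw [popSum]
      rw [if_neg hn]
      rcases Nat.mod_two_eq_zero_or_one n with h2 | h2 <;>
        rcases Nat.mod_two_eq_zero_or_one (popSum (n / 2)) with h3 | h3 <;>
        simp [h2, Nat.add_mod, h3]

-- ===== VERDICT (by name: the statement is the Claim_ definition above) =====
theorem matrix_M_entry_py_spec : Claim_equal_matrix_M_entry_py := by
  unfold Claim_equal_matrix_M_entry_py
  intro row col _
  unfold Spec_matrix_M_entry_py matrix_M_entry_py matrix_M_entry_py_alt
  set b := PySem.Int.band row (PySem.Int.bxor (col >>> (1:Nat)) col) with hb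
  show ((-1:Int) ^ (aLoopSum b 0).toNat) =
    (if b ≤ 0 then 1 else if bFold b.toNat 1 &&& 1 ≠ 0 then -1 else 1)
  rw [aLoopSum_eq b 0, zero_add]
  have htn : ((popSum b.toNat : Int)).toNat = popSum b.toNat := Int.toNat_natCast _
  rw [htn]
  by_cases hble : b ≤ 0
  · rw [if_pos hble]
    have : b.toNat = 0 := by omega
    rw [this, popSum]; simp
  · rw [if_neg hble]
    have hbit : (bFold b.toNat 1).testBit 0 = decide (popSum b.toNat % 2 = 1) := by
      rw [bFold_bit b.toNat 1 (by norm_num), xorStr_one]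
    have hand : (bFold b.toNat 1) &&& 1 = (bFold b.toNat 1) % 2 := Nat.and_one_is_mod _
    rcases Nat.mod_two_eq_zero_or_one (popSum b.toNat) with h2 | h2
    · have heven : Even (popSum b.toNat) := Nat.even_iff.mpr h2
      rw [heven.neg_one_pow]
      have : (bFold b.toNat 1) % 2 = 0 := by
        have := hbit
        rw [Nat.testBit_zero] at this
        simp [h2] at this
        omega
      rw [if_neg (by omega)]
    · have hodd : Odd (popSum b.toNat) := Nat.odd_iff.mpr h2
      rw [hodd.neg_one_pow]
      have : (bFold b.toNat 1) % 2 = 1 := by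
        have := hbit
        rw [Nat.testBit_zero] at this
        simp [h2] at this
        omega
      rw [if_pos (by omega)]
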